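-- pv_equiv track=rewrite | github.com/protwis/protwis | signprot/interactions.py | group_signature_features
-- ===== SOURCE A (Python) =====
-- def group_signature_features(signature_features):
--     """Further prepare signature feature dict for visualization"""
--     grouped_features = {}
--     for feature in signature_features:
--         if feature["gn"] not in grouped_features:
--             grouped_features[feature["gn"]] = []
--         grouped_features[feature["gn"]].append(feature)
--
--     for key in grouped_features:
--         curr_group = grouped_features[key]
--         grouped_features[key] = sorted(
--             curr_group, key=lambda feature: feature["freq"], reverse=True
--         )
--     return grouped_features
-- ===== SOURCE B (Python) =====
-- def group_signature_features(signature_features):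
--     """Further prepare signature feature dict for visualization"""
--     # record gn keys in first-appearance order
--     order = []
--     seen = set()
--     for feature in signature_features:
--         gn = feature["gn"]
--         if gn not in seen:
--             seen.add(gn)
--             order.append(gn)
--     # one global stable sort by freq (descending); each group then comes out
--     # already freq-sorted with equal-freq ties in original input order
--     ranked = sorted(signature_features, key=lambda feature: feature["freq"], reverse=True)
--     grouped = {gn: [] for gn in order}
--     for feature in ranked:
--         grouped[feature["gn"]].append(feature)
--     return grouped
-- ===== Notes on version B (the rewrite author's own statement) =====
-- stated objective: alternative
-- what changed: Instead of building groups first and then sorting each group, B performs one global stable sort of the whole list by freq (descending) and then distributes the sorted features into groups recorded in first-appearance order, so no per-group sort is needed; stability makes each group come out identical to A's per-group sort.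
import Mathlib
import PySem

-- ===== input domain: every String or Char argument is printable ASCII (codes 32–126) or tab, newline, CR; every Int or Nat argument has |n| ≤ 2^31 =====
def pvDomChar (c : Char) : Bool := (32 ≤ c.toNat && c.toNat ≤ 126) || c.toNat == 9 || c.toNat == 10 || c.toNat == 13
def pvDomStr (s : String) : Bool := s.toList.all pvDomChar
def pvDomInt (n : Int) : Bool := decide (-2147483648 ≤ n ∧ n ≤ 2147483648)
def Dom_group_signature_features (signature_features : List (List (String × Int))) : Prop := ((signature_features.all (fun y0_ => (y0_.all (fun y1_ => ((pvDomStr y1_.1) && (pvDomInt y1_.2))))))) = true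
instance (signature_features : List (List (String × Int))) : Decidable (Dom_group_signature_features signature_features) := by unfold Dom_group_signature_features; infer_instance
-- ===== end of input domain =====

-- B replaces A's per-group sorts by ONE global stable sort by freq (descending) followed by a
-- single distribution pass into groups recorded in first-appearance order (alternative
-- decomposition, same cost). Equal return value on all inputs where A returns (Pre_).

-- feature["gn"] / feature["freq"]: first-match dict lookup (present under Pre_)
def pvGn (f : List (String × Int)) : Int := ((PySem.Dict.mk f).get? "gn").getD 0
def pvFreq (f : List (String × Int)) : Int := ((PySem.Dict.mk f).get? "freq").getD 0

-- ===== PORT A =====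
def group_signature_features (signature_features : List (List (String × Int))) : List (Int × List (List (String × Int))) :=
  -- first loop: if gn not in grouped: grouped[gn] = []; grouped[gn].append(feature)
  let grouped : PySem.Dict Int (List (List (String × Int))) :=
    signature_features.foldl
      (fun g f =>
        let g' := if g.contains (pvGn f) then g else g.insert (pvGn f) []
        g'.modify (pvGn f) [] (fun l => l ++ [f]))
      PySem.Dict.empty
  -- second loop: for key in grouped: grouped[key] = sorted(grouped[key], key=freq, reverse=True)
  (grouped.keys.foldl
      (fun d k => d.insert k (PySem.List.sorted (d.getD k []) pvFreq true))
      grouped).items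

-- ===== PORT B =====
def group_signature_features_alt (signature_features : List (List (String × Int))) : List (Int × List (List (String × Int))) :=
  -- gn keys in first-appearance order (list `order` mirrored by set `seen`)
  let order : List Int :=
    (signature_features.foldl
      (fun (st : List Int × PySem.Set Int) f =>
        if PySem.Set.contains st.2 (pvGn f) then st
        else (st.1 ++ [pvGn f], PySem.Set.add st.2 (pvGn f)))
      ([], PySem.Set.empty)).1
  -- one global stable sort by freq, descending
  let ranked := PySem.List.sorted signature_features pvFreq true
  -- grouped = {gn: [] for gn in order}; then distribute the sorted features
  let init : PySem.Dict Int (List (List (String × Int))) :=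
    order.foldl (fun d gn => d.insert gn []) PySem.Dict.empty
  (ranked.foldl (fun d f => d.modify (pvGn f) [] (fun l => l ++ [f])) init).items

-- ===== PRECONDITION & SPEC =====
-- Pre_ excludes exactly the inputs where a feature dict lacks a "gn" or "freq" key, on which
-- Python A raises KeyError (and B raises too).
def Pre_group_signature_features (signature_features : List (List (String × Int))) : Prop :=
  ∀ f ∈ signature_features,
    ((PySem.Dict.mk f).get? "gn").isSome = true ∧ ((PySem.Dict.mk f).get? "freq").isSome = true
instance (signature_features : List (List (String × Int))) : Decidable (Pre_group_signature_features signature_features) := by unfold Pre_group_signature_features; infer_instance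

def pvWitness_group_signature_features : (List (List (String × Int))) :=
  [[("gn", 1), ("freq", 2)], [("gn", 1), ("freq", 3)], [("gn", 2), ("freq", 0)]]

def Spec_group_signature_features (signature_features : List (List (String × Int))) (out : List (Int × List (List (String × Int)))) : Prop := out = group_signature_features_alt signature_features
instance (signature_features : List (List (String × Int))) (out : List (Int × List (List (String × Int)))) : Decidable (Spec_group_signature_features signature_features out) := by unfold Spec_group_signature_features; infer_instance

-- ===== CLAIM (what is proved, stated in full; the proofs are below) =====
def Claim_equal_group_signature_features : Prop := ∀ (signature_features : List (List (String × Int))), Dom_group_signature_features signature_features → Pre_group_signature_features signature_features → Spec_group_signature_features signature_features (group_signature_features signature_features)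

-- ===== LEMMAS AND PROOFS =====

-- abbreviations used only by the proofs
def pvKeys (sf : List (List (String × Int))) : List Int := PySem.Set.ofList (sf.map pvGn)
def pvGroup (sf : List (List (String × Int))) (k : Int) : List (List (String × Int)) :=
  sf.filter (fun f => pvGn f == k)

-- ---- stable insertion sort commutes with filter ----
theorem pv_insertBy_head {α : Type} (bef : α → α → Bool) (x : α) (l : List α)
    (h : ∀ z ∈ l, bef x z = true) : PySem.List.insertBy bef x l = x :: l := by
  cases l with
  | nil => simp [PySem.List.insertBy]
  | cons y ys => simp [PySem.List.insertBy, h y (by simp)]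

theorem pv_insertBy_pairwise {α : Type} (key : α → Int) (x : α) (l : List α)
    (h : l.Pairwise (fun a b => key b ≤ key a)) :
    (PySem.List.insertBy (fun a b => decide (key b < key a)) x l).Pairwise
      (fun a b => key b ≤ key a) := by
  induction l with
  | nil => simp [PySem.List.insertBy]
  | cons y ys ih =>
    rcases List.pairwise_cons.mp h with ⟨hy, hys⟩
    by_cases hxy : key y < key x
    · rw [pv_insertBy_head]
      · exact List.pairwise_cons.mpr ⟨by
          intro z hz
          rcases List.mem_cons.mp hz with rfl | hz
          · exact le_of_lt hxy
          · exact le_trans (hy z hz) (le_of_lt hxy), h⟩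
      · intro z hz
        rcases List.mem_cons.mp hz with rfl | hz
        · simp [hxy]
        · simp [lt_of_le_of_lt (hy z hz) hxy]
    · simp only [PySem.List.insertBy, decide_eq_true_eq, if_neg hxy]
      refine List.pairwise_cons.mpr ⟨?_, ih hys⟩
      intro z hz
      rcases (PySem.List.mem_insertBy _ x z ys).mp hz with rfl | hz
      · exact le_of_not_gt hxy
      · exact hy z hz

theorem pv_filter_insertBy {α : Type} (key : α → Int) (p : α → Bool) (x : α) (l : List α)
    (h : l.Pairwise (fun a b => key b ≤ key a)) :
    (PySem.List.insertBy (fun a b => decide (key b < key a)) x l).filter p =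
      if p x then PySem.List.insertBy (fun a b => decide (key b < key a)) x (l.filter p)
      else l.filter p := by
  induction l with
  | nil => by_cases hp : p x <;> simp [PySem.List.insertBy, hp]
  | cons y ys ih =>
    rcases List.pairwise_cons.mp h with ⟨hy, hys⟩
    by_cases hxy : key y < key x
    · -- x is inserted at the head; every kept element is still below key x
      simp only [PySem.List.insertBy, decide_eq_true_eq, if_pos hxy]
      by_cases hp : p x
      · rw [pv_insertBy_head]
        · simp [hp]
        · intro z hz
          have hz' : z ∈ y :: ys := List.mem_of_mem_filter hz
          rcases List.mem_cons.mp hz' with rfl | hz''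
          · simp [hxy]
          · simp [lt_of_le_of_lt (hy z hz'') hxy]
      · simp [hp]
    · simp only [PySem.List.insertBy, decide_eq_true_eq, if_neg hxy]
      by_cases hpy : p y
      · by_cases hp : p x
        · simp only [List.filter_cons, hpy, if_pos, ih hys, hp]
          simp [PySem.List.insertBy, hxy]
        · simp [hpy, ih hys, hp]
      · simp [hpy, ih hys]

theorem pv_filter_foldl_insertBy {α : Type} (key : α → Int) (p : α → Bool) :
    ∀ (xs : List α) (acc : List α), acc.Pairwise (fun a b => key b ≤ key a) →
      (xs.foldl (fun a x => PySem.List.insertBy (fun a b => decide (key b < key a)) x a) acc).filter p =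
        (xs.filter p).foldl (fun a x => PySem.List.insertBy (fun a b => decide (key b < key a)) x a)
          (acc.filter p) := by
  intro xs
  induction xs with
  | nil => intro acc _; simp
  | cons x xs ih =>
    intro acc hacc
    have hacc' := pv_insertBy_pairwise key x acc hacc
    by_cases hp : p x
    · simp only [List.foldl_cons, List.filter_cons, hp, if_pos]
      rw [ih _ hacc', pv_filter_insertBy key p x acc hacc, if_pos hp]
    · simp only [List.foldl_cons, List.filter_cons, hp]
      rw [ih _ hacc', pv_filter_insertBy key p x acc hacc, if_neg hp]
      simp

theorem pv_filter_sorted {α : Type} (key : α → Int) (p : α → Bool) (xs : List α) :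
    (PySem.List.sorted xs key true).filter p = PySem.List.sorted (xs.filter p) key true := by
  rw [PySem.List.sorted_rev_eq_foldl_insertBy, PySem.List.sorted_rev_eq_foldl_insertBy]
  have := pv_filter_foldl_insertBy key p xs [] (by simp)
  simpa using this

-- ---- shared characterisation of the grouping fold ----
theorem pv_groupFold_eq_modify (sf : List (List (String × Int)))
    (g : PySem.Dict Int (List (List (String × Int)))) :
    sf.foldl
      (fun g f =>
        let g' := if g.contains (pvGn f) then g else g.insert (pvGn f) []
        g'.modify (pvGn f) [] (fun l => l ++ [f])) g =
    sf.foldl (fun g f => g.modify (pvGn f) [] (fun l => l ++ [f])) g := by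
  have hstep :
      (fun (g : PySem.Dict Int (List (List (String × Int)))) f =>
        let g' := if g.contains (pvGn f) then g else g.insert (pvGn f) []
        g'.modify (pvGn f) [] (fun l => l ++ [f])) =
      (fun g f => g.modify (pvGn f) [] (fun l => l ++ [f])) := by
    funext d f
    by_cases h : d.contains (pvGn f)
    · simp [h]
    · simp only [h, PySem.Dict.modify,
        PySem.Dict.getD_of_not_contains d _ (by simpa using h)]
      simp [PySem.Dict.insert_insert_self]
  rw [hstep]

theorem pv_modifyFold_getD (sf : List (List (String × Int)))
    (d : PySem.Dict Int (List (List (String × Int)))) (k : Int) :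
    (sf.foldl (fun g f => g.modify (pvGn f) [] (fun l => l ++ [f])) d).getD k [] =
      d.getD k [] ++ pvGroup sf k := by
  have h := PySem.Dict.getD_foldl_modify_append (sf.map (fun f => (pvGn f, f))) d k
  rw [List.foldl_map] at h
  simpa [pvGroup, List.filter_map, Function.comp_def] using h

theorem pv_modifyFold_keys (sf : List (List (String × Int)))
    (d : PySem.Dict Int (List (List (String × Int)))) :
    (sf.foldl (fun g f => g.modify (pvGn f) [] (fun l => l ++ [f])) d).keys =
      PySem.Set.update d.keys (sf.map pvGn) :=
  PySem.Dict.keys_foldl_modify_key sf pvGn [] (fun _ f => fun l => l ++ [f]) d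

-- ---- rewriting every value of a dict over its own key list ----
theorem pv_foldl_insert_keys {κ ν : Type} [BEq κ] [LawfulBEq κ] [DecidableEq κ]
    (F : ν → ν) (dflt : ν) :
    ∀ (ks : List κ) (d : PySem.Dict κ ν), ks.Nodup → d.keys.Nodup →
      (∀ k ∈ ks, d.contains k = true) →
      (ks.foldl (fun d k => d.insert k (F (d.getD k dflt))) d).items
        = d.items.map (fun p => if p.1 ∈ ks then (p.1, F p.2) else p) := by
  intro ks
  induction ks with
  | nil => intro d _ _ _; simp
  | cons k0 ks ih =>
    intro d hnd hkeys hc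
    have hc0 : d.contains k0 = true := hc k0 (by simp)
    have hitems := PySem.Dict.items_insert_of_contains d (F (d.getD k0 dflt)) hc0
    have hkeys' : (d.insert k0 (F (d.getD k0 dflt))).keys = d.keys :=
      PySem.Dict.keys_insert_of_contains d _ hc0
    rw [List.foldl_cons, ih _ (List.nodup_cons.mp hnd).2 (hkeys' ▸ hkeys)
        (by intro k hk
            rw [PySem.Dict.contains_eq_decide_mem_keys, hkeys',
              ← PySem.Dict.contains_eq_decide_mem_keys]
            exact hc k (by simp [hk])), hitems, List.map_map]
    apply List.map_congr_left
    intro p hp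
    by_cases hpk : p.1 = k0
    · have hval : d.getD k0 dflt = p.2 := by
        rw [← hpk]
        exact PySem.Dict.getD_of_mem_items d (by simpa using hp) hkeys dflt
      have hnk0 : k0 ∉ ks := (List.nodup_cons.mp hnd).1
      simp [hpk, hval, hnk0]
    · simp [hpk, List.mem_cons]

-- ---- characterisation of port A ----
theorem pv_A_eq (sf : List (List (String × Int))) :
    group_signature_features sf =
      (pvKeys sf).map (fun k => (k, PySem.List.sorted (pvGroup sf k) pvFreq true)) := by
  unfold group_signature_features
  rw [pv_groupFold_eq_modify]
  set D1 := sf.foldl (fun g f => g.modify (pvGn f) [] (fun l => l ++ [f])) PySem.Dict.empty with hD1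
  have hkeys : D1.keys = pvKeys sf := by
    rw [hD1, pv_modifyFold_keys]
    simp [pvKeys, PySem.Dict.keys_empty, PySem.Set.update_nil_left]
  have hnd : D1.keys.Nodup := by
    rw [hkeys]; exact PySem.Set.nodup_ofList _
  have hgetD : ∀ k, D1.getD k [] = pvGroup sf k := by
    intro k
    rw [hD1, pv_modifyFold_getD]
    simp [PySem.Dict.getD_empty]
  have hitems : D1.items = (pvKeys sf).map (fun k => (k, pvGroup sf k)) := by
    rw [PySem.Dict.items_eq_map_keys D1 hnd [], hkeys]
    exact List.map_congr_left (fun k _ => by rw [hgetD])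
  rw [pv_foldl_insert_keys (fun v => PySem.List.sorted v pvFreq true) [] D1.keys D1 hnd hnd
      (fun k hk => by
        rw [PySem.Dict.contains_eq_decide_mem_keys]; simpa using hk),
    hitems, hkeys]
  rw [List.map_map]
  apply List.map_congr_left
  intro k hk
  simp [hk]

-- ---- characterisation of port B ----
theorem pv_order_fold (sf : List (List (String × Int))) :
    ∀ (s : List Int),
      sf.foldl
        (fun (st : List Int × PySem.Set Int) f =>
          if PySem.Set.contains st.2 (pvGn f) then st
          else (st.1 ++ [pvGn f], PySem.Set.add st.2 (pvGn f))) (s, s)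
        = ((sf.map pvGn).foldl PySem.Set.add s, (sf.map pvGn).foldl PySem.Set.add s) := by
  induction sf with
  | nil => intro s; simp
  | cons f sf ih =>
    intro s
    by_cases h : PySem.Set.contains s (pvGn f)
    · have hmem : pvGn f ∈ s := by simpa [PySem.Set.contains_eq_decide] using h
      have hadd : PySem.Set.add s (pvGn f) = s := PySem.Set.add_of_mem hmem
      simp only [List.foldl_cons, List.map_cons, h, if_pos, hadd]
      exact ih s
    · have hmem : pvGn f ∉ s := by simpa using h
      have hadd : PySem.Set.add s (pvGn f) = s ++ [pvGn f] := PySem.Set.add_of_not_mem hmem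
      simp only [List.foldl_cons, List.map_cons, h, if_neg, Bool.false_eq_true,
        not_false_eq_true, hadd]
      exact ih (s ++ [pvGn f])
    
theorem pv_B_eq (sf : List (List (String × Int))) :
    group_signature_features_alt sf =
      (pvKeys sf).map (fun k => (k, PySem.List.sorted (pvGroup sf k) pvFreq true)) := by
  unfold group_signature_features_alt
  have horder :
      (sf.foldl
        (fun (st : List Int × PySem.Set Int) f =>
          if PySem.Set.contains st.2 (pvGn f) then st
          else (st.1 ++ [pvGn f], PySem.Set.add st.2 (pvGn f)))
        ([], PySem.Set.empty)).1 = pvKeys sf := by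
    have h0 : (PySem.Set.empty : PySem.Set Int) = ([] : List Int) := rfl
    rw [h0, pv_order_fold sf []]
    simp [pvKeys, PySem.Set.ofList_eq_foldl]
  rw [horder]
  set init := (pvKeys sf).foldl (fun d gn => d.insert gn []) PySem.Dict.empty with hinit
  have hnodupK : (pvKeys sf).Nodup := PySem.Set.nodup_ofList _
  have hinit_items : init.items = (pvKeys sf).map (fun k => (k, ([] : List (List (String × Int))))) := by
    rw [hinit]
    have := PySem.Dict.items_foldl_insert_fresh (pvKeys sf) (fun k => k)
      (fun _ => ([] : List (List (String × Int)))) PySem.Dict.empty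
      (fun a _ => PySem.Dict.contains_empty a) (by simpa using hnodupK)
    simpa using this
  have hinit_keys : init.keys = pvKeys sf := by
    simp [PySem.Dict.keys, hinit_items, Function.comp_def]
  have hinit_nd : init.keys.Nodup := by rw [hinit_keys]; exact hnodupK
  have hinit_getD : ∀ k, init.getD k [] = [] := by
    intro k
    by_cases hk : init.contains k = true
    · have hkmem : k ∈ init.keys := (PySem.Dict.contains_iff_mem_keys _ _).mp hk
      rw [hinit_keys] at hkmem
      have : (k, ([] : List (List (String × Int)))) ∈ init.items := by
        rw [hinit_items]; exact List.mem_map.mpr ⟨k, hkmem, rfl⟩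
      exact PySem.Dict.getD_of_mem_items init this hinit_nd []
    · exact PySem.Dict.getD_of_not_contains init [] (by simpa using hk)
  set ranked := PySem.List.sorted sf pvFreq true with hranked
  set R := ranked.foldl (fun d f => d.modify (pvGn f) [] (fun l => l ++ [f])) init with hR
  have hRkeys : R.keys = pvKeys sf := by
    rw [hR, pv_modifyFold_keys, hinit_keys, PySem.Set.update_eq_append_filter]
    have : List.filter (fun y => !PySem.Set.contains (pvKeys sf) y)
        (PySem.Set.ofList (ranked.map pvGn)) = [] := by
      rw [List.filter_eq_nil_iff]
      intro y hy
      have hy' : y ∈ ranked.map pvGn := (PySem.Set.mem_ofList _ _).mp hy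
      have : y ∈ sf.map pvGn := by
        rcases List.mem_map.mp hy' with ⟨f, hf, rfl⟩
        exact List.mem_map.mpr ⟨f, (PySem.List.mem_sorted sf pvFreq true f).mp hf, rfl⟩
      have hmem : y ∈ pvKeys sf := (PySem.Set.mem_ofList _ _).mpr this
      simp [hmem]
    rw [this, List.append_nil]
  have hRnd : R.keys.Nodup :=
    hR ▸ PySem.Dict.nodup_keys_foldl_modify_key ranked pvGn [] (fun _ f => fun l => l ++ [f]) init hinit_nd
  have hRgetD : ∀ k, R.getD k [] = PySem.List.sorted (pvGroup sf k) pvFreq true := by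
    intro k
    rw [hR, pv_modifyFold_getD, hinit_getD, List.nil_append, pvGroup, hranked,
      pv_filter_sorted pvFreq (fun f => pvGn f == k) sf]
    rfl
  rw [PySem.Dict.items_eq_map_keys R hRnd [], hRkeys]
  exact List.map_congr_left (fun k _ => by rw [hRgetD])

-- ===== VERDICT (by name: the statement is the Claim_ definition above) =====
theorem group_signature_features_spec : Claim_equal_group_signature_features := by
  intro sf _ _
  unfold Spec_group_signature_features
  rw [pv_A_eq, pv_B_eq]
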